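-- pv_equiv track=rewrite | github.com/rweglarz/network-lab | network_lab/engine.py | _parse_bird_peers
-- ===== SOURCE A (Python) =====
-- def _parse_bird_peers(output: str) -> list[dict]:
--     """Parse 'birdc show protocols all' output into unified peer dicts."""
--     peers = []
--     current = None
--     for line in output.splitlines():
--         parts = line.split()
--         # Protocol header: Name Proto Table State Since [Info]
--         if parts and len(parts) >= 5 and parts[1] == "BGP":
--             if current:
--                 peers.append(current)
--             info = parts[5] if len(parts) >= 6 else parts[3]
--             current = {
--                 "neighbor": parts[0],
--                 "remote_asn": "?",
--                 "state": info.lower(),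
--             }
--         elif current and line.strip().startswith("Neighbor address:"):
--             current["neighbor_ip"] = line.split(":", 1)[1].strip()
--         elif current and line.strip().startswith("Neighbor AS:"):
--             current["remote_asn"] = line.split(":", 1)[1].strip()
--         elif current and line.strip().startswith("BGP state:"):
--             bgp_state = line.split(":", 1)[1].strip().lower()
--             # header "down" + BGP state "down" = admin disabled
--             if current["state"] == "down" and bgp_state == "down":
--                 current["state"] = "admin down"
--             else:
--                 current["state"] = bgp_state
--     if current:
--         peers.append(current)
--     return peers
-- ===== SOURCE B (Python) =====
-- def _block_to_peer(parts, body):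
--     """Build one peer dict from a header's fields and the block's body lines."""
--     info = parts[5] if len(parts) >= 6 else parts[3]
--     peer = {"neighbor": parts[0], "remote_asn": "?", "state": info.lower()}
--     for line in body:
--         s = line.strip()
--         if s.startswith("Neighbor address:"):
--             peer["neighbor_ip"] = line.split(":", 1)[1].strip()
--         elif s.startswith("Neighbor AS:"):
--             peer["remote_asn"] = line.split(":", 1)[1].strip()
--         elif s.startswith("BGP state:"):
--             bgp_state = line.split(":", 1)[1].strip().lower()
--             # header "down" + BGP state "down" = admin disabled
--             peer["state"] = ("admin down"
--                              if peer["state"] == "down" and bgp_state == "down"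
--                              else bgp_state)
--     return peer
--
--
-- def _parse_bird_peers(output: str) -> list[dict]:
--     """Parse 'birdc show protocols all' output into unified peer dicts."""
--     # Phase 1: group the lines into (header-fields, body-lines) blocks,
--     # discarding anything before the first BGP header.
--     blocks = []
--     for line in output.splitlines():
--         parts = line.split()
--         if len(parts) >= 5 and parts[1] == "BGP":
--             blocks.append((parts, []))
--         elif blocks:
--             blocks[-1][1].append(line)
--     # Phase 2: map each block to a peer dict.
--     return [_block_to_peer(parts, body) for parts, body in blocks]
-- ===== Notes on version B (the rewrite author's own statement) =====
-- stated objective: alternative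
-- what changed: Replaces the single running-current loop by a two-phase decomposition: first group the lines into (header, body) blocks discarding pre-header lines, then map each block to a peer dict with a helper that folds the body lines.
import Mathlib
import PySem

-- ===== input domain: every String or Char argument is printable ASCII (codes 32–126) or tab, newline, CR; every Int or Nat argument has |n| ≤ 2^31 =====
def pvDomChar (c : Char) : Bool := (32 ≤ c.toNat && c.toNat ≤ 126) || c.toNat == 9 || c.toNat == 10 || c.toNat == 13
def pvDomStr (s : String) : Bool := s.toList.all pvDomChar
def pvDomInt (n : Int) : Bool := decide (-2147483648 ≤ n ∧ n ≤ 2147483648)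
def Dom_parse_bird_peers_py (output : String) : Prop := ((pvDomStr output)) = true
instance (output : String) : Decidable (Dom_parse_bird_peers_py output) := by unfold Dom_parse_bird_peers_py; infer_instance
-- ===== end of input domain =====

-- B replaces A's running-current loop by a two-phase decomposition (group lines into
-- header/body blocks, then map each block to a peer dict); same cost, different structure.


-- ===== PORT A =====

-- line.split(":", 1)[1].strip() — ':' is always present at each use site (the stripped
-- line starts with a prefix containing ':'), so index 1 exists; sep ≠ "" so splitMax? is some.
def pvAfterColon (line : String) : String :=
  PySem.Str.strip (((PySem.Str.splitMax? line ":" 1).getD []).getD 1 "")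

-- One iteration of A's `for line in output.splitlines()` loop; state = (peers, current).
-- Python's `if current:` / `elif current and …`: whenever `current` is not None it is a
-- dict with at least three keys (never emptied), so its truthiness is exactly `isSome`.
def pvAStep (st : List (PySem.Dict String String) × Option (PySem.Dict String String))
    (line : String) : List (PySem.Dict String String) × Option (PySem.Dict String String) :=
  let parts := PySem.Str.split₀ line
  if parts ≠ [] ∧ 5 ≤ parts.length ∧ PySem.List.pyGet? parts 1 = some "BGP" then
    let peers := match st.2 with
      | some c => st.1 ++ [c]
      | none => st.1
    -- parts[5] / parts[3] / parts[0] are in range here (len ≥ 5, resp. ≥ 6)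
    let info := if 6 ≤ parts.length then (PySem.List.pyGet? parts 5).getD ""
                else (PySem.List.pyGet? parts 3).getD ""
    let cur := (((PySem.Dict.empty.insert "neighbor"
        ((PySem.List.pyGet? parts 0).getD "")).insert
        "remote_asn" "?").insert "state" (PySem.Str.lower info))
    (peers, some cur)
  else
    match st.2 with
    | none => st
    | some c =>
      if PySem.Str.startswith (PySem.Str.strip line) "Neighbor address:" then
        (st.1, some (c.insert "neighbor_ip" (pvAfterColon line)))
      else if PySem.Str.startswith (PySem.Str.strip line) "Neighbor AS:" then
        (st.1, some (c.insert "remote_asn" (pvAfterColon line)))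
      else if PySem.Str.startswith (PySem.Str.strip line) "BGP state:" then
        let bgp_state := PySem.Str.lower (pvAfterColon line)
        -- current["state"] always exists (set at creation); getD "" never takes its default
        if c.getD "state" "" = "down" ∧ bgp_state = "down" then
          (st.1, some (c.insert "state" "admin down"))
        else
          (st.1, some (c.insert "state" bgp_state))
      else st

def parse_bird_peers_py (output : String) : List (List (String × String)) :=
  let fin := (PySem.Str.splitlines output).foldl pvAStep ([], none)
  (match fin.2 with
   | some c => fin.1 ++ [c]
   | none => fin.1).map PySem.Dict.items

-- ===== PORT B =====

-- one body line applied to the peer dict (the helper loop's body in _block_to_peer)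
def pvBodyStep (peer : PySem.Dict String String) (line : String) : PySem.Dict String String :=
  let s := PySem.Str.strip line
  if PySem.Str.startswith s "Neighbor address:" then
    peer.insert "neighbor_ip" (pvAfterColon line)
  else if PySem.Str.startswith s "Neighbor AS:" then
    peer.insert "remote_asn" (pvAfterColon line)
  else if PySem.Str.startswith s "BGP state:" then
    let bgp_state := PySem.Str.lower (pvAfterColon line)
    peer.insert "state"
      (if peer.getD "state" "" = "down" ∧ bgp_state = "down" then "admin down" else bgp_state)
  else peer

-- _block_to_peer(parts, body)
def pvBlockToPeer (parts : List String) (body : List String) : PySem.Dict String String :=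
  let info := if 6 ≤ parts.length then (PySem.List.pyGet? parts 5).getD ""
              else (PySem.List.pyGet? parts 3).getD ""
  body.foldl pvBodyStep
    (((PySem.Dict.empty.insert "neighbor"
        ((PySem.List.pyGet? parts 0).getD "")).insert
        "remote_asn" "?").insert "state" (PySem.Str.lower info))

-- phase 1 loop body: start a new block on a header line, else extend the last block
def pvAddLine (blocks : List (List String × List String)) (line : String) :
    List (List String × List String) :=
  let parts := PySem.Str.split₀ line
  if 5 ≤ parts.length ∧ PySem.List.pyGet? parts 1 = some "BGP" then
    blocks ++ [(parts, [])]
  else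
    match blocks.getLast? with
    | some b => blocks.dropLast ++ [(b.1, b.2 ++ [line])]   -- blocks[-1][1].append(line)
    | none => blocks
def parse_bird_peers_py_alt (output : String) : List (List (String × String)) :=
  ((PySem.Str.splitlines output).foldl pvAddLine []).map
    (fun b => (pvBlockToPeer b.1 b.2).items)

-- ===== PRECONDITION & SPEC =====
def Spec_parse_bird_peers_py (output : String) (out : List (List (String × String))) : Prop := out = parse_bird_peers_py_alt output
instance (output : String) (out : List (List (String × String))) : Decidable (Spec_parse_bird_peers_py output out) := by unfold Spec_parse_bird_peers_py; infer_instance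

-- ===== CLAIM (what is proved, stated in full; the proofs are below) =====
def Claim_equal_parse_bird_peers_py : Prop := ∀ (output : String), Dom_parse_bird_peers_py output → Spec_parse_bird_peers_py output (parse_bird_peers_py output)

-- ===== LEMMAS AND PROOFS =====

-- finish A's loop: flush the pending peer
def pvAFinish (st : List (PySem.Dict String String) × Option (PySem.Dict String String)) :
    List (PySem.Dict String String) :=
  match st.2 with
  | some c => st.1 ++ [c]
  | none => st.1

def pvToPeer (b : List String × List String) : PySem.Dict String String :=
  pvBlockToPeer b.1 b.2

-- Main invariant: running A's loop from a state that mirrors B's blocks yields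
-- (peers ++) the peers of B's final blocks.
theorem pvMain (lines : List String) : ∀ (peers : List (PySem.Dict String String))
    (blocks : List (List String × List String)),
    pvAFinish (lines.foldl pvAStep
        (peers ++ blocks.dropLast.map pvToPeer, blocks.getLast?.map pvToPeer))
      = peers ++ (lines.foldl pvAddLine blocks).map pvToPeer := by
  induction lines with
  | nil =>
    intro peers blocks
    induction blocks using List.reverseRecOn with
    | nil => simp [pvAFinish]
    | append_singleton bs b _ => simp [pvAFinish]
  | cons line lines ih =>
    intro peers blocks
    simp only [List.foldl_cons]
    by_cases hhd : 5 ≤ (PySem.Str.split₀ line).length ∧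
        PySem.List.pyGet? (PySem.Str.split₀ line) 1 = some "BGP"
    · -- header line: A flushes and restarts, B appends a fresh block
      have hne : PySem.Str.split₀ line ≠ [] := by
        intro h; rw [h] at hhd; simp at hhd
      have hA : pvAStep (peers ++ blocks.dropLast.map pvToPeer, blocks.getLast?.map pvToPeer) line
          = (peers ++ blocks.map pvToPeer, some (pvToPeer (PySem.Str.split₀ line, []))) := by
        induction blocks using List.reverseRecOn with
        | nil => simp [pvAStep, hne, hhd.1, hhd.2, pvToPeer, pvBlockToPeer]
        | append_singleton bs b _ => simp [pvAStep, hne, hhd.1, hhd.2, pvToPeer, pvBlockToPeer]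
      have hB : pvAddLine blocks line = blocks ++ [(PySem.Str.split₀ line, [])] := by
        simp [pvAddLine, hhd.1, hhd.2]
      rw [hA, hB]
      have := ih peers (blocks ++ [(PySem.Str.split₀ line, [])])
      simpa using this
    · -- non-header line
      induction blocks using List.reverseRecOn with
      | nil =>
        have hA : pvAStep (peers ++ ([] : List (List String × List String)).dropLast.map pvToPeer,
            ([] : List (List String × List String)).getLast?.map pvToPeer) line
            = (peers, none) := by
          have hhd' : ¬(PySem.Str.split₀ line ≠ [] ∧ 5 ≤ (PySem.Str.split₀ line).length ∧
              PySem.List.pyGet? (PySem.Str.split₀ line) 1 = some "BGP") :=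
            fun h => hhd ⟨h.2.1, h.2.2⟩
          simp [pvAStep, hhd']
        have hB : pvAddLine ([] : List (List String × List String)) line = [] := by
          simp [pvAddLine, hhd]
        rw [hA, hB]
        simpa using ih peers []
      | append_singleton bs b _ =>
        have hA : pvAStep (peers ++ (bs ++ [b]).dropLast.map pvToPeer,
            (bs ++ [b]).getLast?.map pvToPeer) line
            = (peers ++ bs.map pvToPeer, some (pvBodyStep (pvToPeer b) line)) := by
          have hhd' : ¬(PySem.Str.split₀ line ≠ [] ∧ 5 ≤ (PySem.Str.split₀ line).length ∧
              PySem.List.pyGet? (PySem.Str.split₀ line) 1 = some "BGP") :=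
            fun h => hhd ⟨h.2.1, h.2.2⟩
          simp only [List.dropLast_concat, List.getLast?_concat, Option.map_some,
            pvAStep, pvBodyStep]
          rw [if_neg hhd']
          split_ifs <;> rfl
        have hB : pvAddLine (bs ++ [b]) line = bs ++ [(b.1, b.2 ++ [line])] := by
          simp [pvAddLine, hhd]
        rw [hA, hB]
        have hpeer : pvToPeer (b.1, b.2 ++ [line]) = pvBodyStep (pvToPeer b) line := by
          simp [pvToPeer, pvBlockToPeer]
        have := ih peers (bs ++ [(b.1, b.2 ++ [line])])
        simp only [List.dropLast_concat, List.getLast?_concat, Option.map_some, hpeer] at this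
        exact this

-- ===== VERDICT (by name: the statement is the Claim_ definition above) =====
theorem parse_bird_peers_py_spec : Claim_equal_parse_bird_peers_py := by
  intro output _
  unfold Spec_parse_bird_peers_py parse_bird_peers_py parse_bird_peers_py_alt
  have := pvMain (PySem.Str.splitlines output) [] []
  simp only [List.dropLast_nil, List.map_nil, List.append_nil, List.getLast?_nil,
    Option.map_none, List.nil_append] at this
  rw [show pvAFinish ((PySem.Str.splitlines output).foldl pvAStep ([], none))
      = (match ((PySem.Str.splitlines output).foldl pvAStep ([], none)).2 with
         | some c => ((PySem.Str.splitlines output).foldl pvAStep ([], none)).1 ++ [c]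
         | none => ((PySem.Str.splitlines output).foldl pvAStep ([], none)).1) from rfl] at this
  simp [this, pvToPeer]
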